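-- pv_equiv track=rewrite | github.com/kleglich/Taller3 | Taller 3/Actividad3.py | analizar_pares_impares
-- ===== SOURCE A (Python) =====
-- def analizar_pares_impares(num):
--     pares = 0
--     impares = 0
--     suma_pares = 0
--     suma_impares = 0
--     for i in range(1, num+1):
--         if i % 2 == 0:
--             pares += 1
--             suma_pares += i
--         else:
--             impares += 1
--             suma_impares += i
--     return pares, impares, suma_pares, suma_impares
-- ===== SOURCE B (Python) =====
-- def analizar_pares_impares(num):
--     m = num if num > 0 else 0
--     pares = m // 2
--     impares = (m + 1) // 2
--     suma_pares = pares * (pares + 1)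
--     suma_impares = impares * impares
--     return pares, impares, suma_pares, suma_impares
-- ===== Notes on version B (the rewrite author's own statement) =====
-- stated objective: faster
-- what changed: Replaced the O(n) loop over 1..num with closed-form arithmetic formulas for the even/odd counts and sums.
import Mathlib
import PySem

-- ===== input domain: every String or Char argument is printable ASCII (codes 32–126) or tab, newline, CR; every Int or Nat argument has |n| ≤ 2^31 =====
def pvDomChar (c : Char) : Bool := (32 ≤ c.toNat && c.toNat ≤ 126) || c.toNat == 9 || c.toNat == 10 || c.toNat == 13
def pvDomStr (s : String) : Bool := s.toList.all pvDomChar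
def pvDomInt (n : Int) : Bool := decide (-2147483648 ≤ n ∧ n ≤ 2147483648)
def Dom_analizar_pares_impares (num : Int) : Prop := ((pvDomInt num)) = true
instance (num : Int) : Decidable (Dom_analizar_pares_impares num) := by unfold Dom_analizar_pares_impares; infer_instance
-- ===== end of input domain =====

-- B replaces A's O(n) loop over 1..num by closed-form O(1) arithmetic for the counts and sums.

-- ===== PORT A =====
-- literal transliteration of A's loop over range(1, num+1); pvStep is the loop body
def pvStep : (Int × Int × Int × Int) → Int → (Int × Int × Int × Int) :=
  fun st i =>
    let (pares, impares, suma_pares, suma_impares) := st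
    if PySem.Int.mod i 2 == 0 then
      (pares + 1, impares, suma_pares + i, suma_impares)
    else
      (pares, impares + 1, suma_pares, suma_impares + i)

def analizar_pares_impares (num : Int) : List Int :=
  let st := (PySem.List.pyRange 1 (num + 1) 1).foldl pvStep (0, 0, 0, 0)
  [st.1, st.2.1, st.2.2.1, st.2.2.2]

-- ===== PORT B =====
-- literal transliteration of Source B's closed-form formulas
def analizar_pares_impares_alt (num : Int) : List Int :=
  let m := if num > 0 then num else 0
  let pares := PySem.Int.floordiv m 2
  let impares := PySem.Int.floordiv (m + 1) 2
  let suma_pares := pares * (pares + 1)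
  let suma_impares := impares * impares
  [pares, impares, suma_pares, suma_impares]

-- ===== PRECONDITION & SPEC =====
def Spec_analizar_pares_impares (num : Int) (out : List Int) : Prop := out = analizar_pares_impares_alt num
instance (num : Int) (out : List Int) : Decidable (Spec_analizar_pares_impares num out) := by unfold Spec_analizar_pares_impares; infer_instance

-- ===== CLAIM (what is proved, stated in full; the proofs are below) =====
def Claim_equal_analizar_pares_impares : Prop := ∀ (num : Int), Dom_analizar_pares_impares num → Spec_analizar_pares_impares num (analizar_pares_impares num)

-- ===== LEMMAS AND PROOFS =====

theorem pvLoop_closed (n : Nat) :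
    ((List.range n).map (fun (k : Nat) => (1 : Int) + (k : Int))).foldl pvStep (0, 0, 0, 0)
      = ((n : Int) / 2, ((n : Int) + 1) / 2,
         ((n : Int) / 2) * ((n : Int) / 2 + 1),
         (((n : Int) + 1) / 2) * (((n : Int) + 1) / 2)) := by
  induction n with
  | zero => simp
  | succ n ih =>
    rw [List.range_succ, List.map_append, List.foldl_append, ih]
    simp only [List.map_cons, List.map_nil, List.foldl_cons, List.foldl_nil, pvStep]
    have hmod : PySem.Int.mod ((1 : Int) + n) 2 = ((1 : Int) + n) % 2 :=
      PySem.Int.mod_eq_emod_of_pos (by norm_num)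
    rcases Int.even_or_odd (n : Int) with ⟨k, hk⟩ | ⟨k, hk⟩
    · have h1 : PySem.Int.mod ((1 : Int) + n) 2 ≠ 0 := by rw [hmod]; omega
      simp only [beq_iff_eq, h1, if_false]
      push_cast
      refine Prod.ext ?_ (Prod.ext ?_ (Prod.ext ?_ ?_)) <;> simp <;> try omega
      · -- suma_pares component: equal divisions
        have : ((n : Int) + 1) / 2 = (n : Int) / 2 := by omega
        rw [this]
      · have h2 : ((n : Int) + 1 + 1) / 2 = ((n : Int) + 1) / 2 + 1 := by omega
        have h3 : ((n : Int) + 1) / 2 = k := by omega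
        rw [h2, h3]; ring_nf; omega
    · have h1 : PySem.Int.mod ((1 : Int) + n) 2 = 0 := by rw [hmod]; omega
      simp only [h1, beq_self_eq_true, if_true]
      push_cast
      refine Prod.ext ?_ (Prod.ext ?_ (Prod.ext ?_ ?_)) <;> simp <;> try omega
      · have h2 : ((n : Int) + 1) / 2 = (n : Int) / 2 + 1 := by omega
        have h3 : (n : Int) / 2 = k := by omega
        rw [h2, h3]; ring_nf; omega
      · have : ((n : Int) + 1 + 1) / 2 = ((n : Int) + 1) / 2 := by omega
        rw [this]

-- ===== VERDICT (by name: the statement is the Claim_ definition above) =====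
theorem analizar_pares_impares_spec : Claim_equal_analizar_pares_impares := by
  intro num _
  unfold Spec_analizar_pares_impares analizar_pares_impares analizar_pares_impares_alt
  rw [PySem.List.pyRange_one]
  have hr : (num + 1 - 1) = num := by ring
  rw [hr]
  rw [pvLoop_closed]
  have hf : ∀ a : Int, PySem.Int.floordiv a 2 = a / 2 :=
    fun a => PySem.Int.floordiv_eq_ediv_of_pos (by norm_num)
  simp only [hf]
  by_cases h : num > 0
  · have : ((num.toNat : Int)) = num := by omega
    simp [h, this]
  · have : num.toNat = 0 := by omega
    simp [h, this]
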